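-- pv_equiv track=rewrite | github.com/2jimoo/P_C_C_P | done/0307_pccp_1_3.py | solution
-- ===== SOURCE A (Python) =====
-- def go(g, p, base):
--     # 1세대
--     if g == 1:
--         return "Rr"
--     # 2세대: 1세대의 p번째 자식
--     elif g == 1:
--         return base["Rr"][p]
--     # 3세대 이후
--     # 내 부모 par: g-1 세대 par_order 번째
--     ch_order = p & 3
--     par_order = p // 4 + (1 if ch_order != 0 else 0)
--     par = go(g - 1, par_order, base)
--     # 나는 par의 ch_order 번째 자식
--     ch = base[par][ch_order]
--     return ch
--
-- def solution(queries):
--     base = {"RR": ["RR"] * 5, "Rr": ["rr", "RR", "Rr", "Rr", "rr"], "rr": ["rr"] * 5}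
--     answer = []
--     for q in queries:
--         g, p = q[0], q[1]
--         ans = go(g, p, base)
--         answer.append(ans)
--     return answer
-- ===== SOURCE B (Python) =====
-- def solution(queries):
--     # Key fact: "RR" and "rr" are absorbing genotypes, so the answer is decided by the
--     # child position of the highest ancestor (closest to generation 1) whose position
--     # within its parent is 0 (-> "rr") or 1 (-> "RR"); if no such ancestor, "Rr".
--     # Walking UP the tree, later steps are closer to the root and therefore override.
--     answer = []
--     for q in queries:
--         g, p = q[0], q[1]
--         geno = "Rr"
--         while g > 1:
--             ch = p & 3
--             if ch == 0:
--                 geno = "rr"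
--             elif ch == 1:
--                 geno = "RR"
--             p = p // 4 + (1 if ch != 0 else 0)
--             g -= 1
--         answer.append(geno)
--     return answer
-- ===== Notes on version B (the rewrite author's own statement) =====
-- stated objective: faster
-- what changed: Exploits that RR and rr are absorbing genotypes: B walks up the tree once keeping only the current best answer (the {0,1}-child position closest to the root overrides), so the genotype table, the recursion and any stack of collected digits disappear.
import Mathlib
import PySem

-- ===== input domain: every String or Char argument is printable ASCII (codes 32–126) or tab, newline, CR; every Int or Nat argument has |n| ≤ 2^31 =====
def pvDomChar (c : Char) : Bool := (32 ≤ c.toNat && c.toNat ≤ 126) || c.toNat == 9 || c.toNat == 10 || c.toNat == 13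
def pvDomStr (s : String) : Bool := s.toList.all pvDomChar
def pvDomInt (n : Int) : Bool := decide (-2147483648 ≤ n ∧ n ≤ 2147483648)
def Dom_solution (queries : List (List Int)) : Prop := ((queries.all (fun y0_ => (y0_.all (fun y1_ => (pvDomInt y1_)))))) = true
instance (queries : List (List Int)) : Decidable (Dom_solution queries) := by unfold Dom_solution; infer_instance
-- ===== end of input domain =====

-- B replaces A's table-driven recursion by a single upward loop that uses the absorption of
-- "RR"/"rr" to keep just the current answer (alternative algorithm, no table, no recursion).

-- ===== PORT A =====
-- the dict literal `base` built in A's `solution`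
def baseA : PySem.Dict String (List String) :=
  ((PySem.Dict.empty.insert "RR" ["RR", "RR", "RR", "RR", "RR"]).insert
      "Rr" ["rr", "RR", "Rr", "Rr", "rr"]).insert "rr" ["rr", "rr", "rr", "rr", "rr"]

-- A's recursive `go` (the `elif g == 1` branch is dead code and omitted).
-- For g < 1 Python recurses forever (RecursionError); those inputs are outside Pre_,
-- the `g ≤ 1` guard only makes the port total there. Dict/list lookups use `.getD`
-- junk defaults only on KeyError/IndexError cases that are unreachable (par is always
-- a key of base and ch_order ∈ [0,3]).
def goA (g p : Int) (base : PySem.Dict String (List String)) : String :=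
  if g = 1 then "Rr"
  else if g ≤ 1 then "Rr"
  else
    let ch_order := PySem.Int.band p 3
    let par_order := PySem.Int.floordiv p 4 + (if ch_order ≠ 0 then 1 else 0)
    let par := goA (g - 1) par_order base
    (PySem.List.pyGet? ((base.get? par).getD []) ch_order).getD ""
termination_by g.toNat
decreasing_by omega

-- A's `solution` loop: answer.append(go(q[0], q[1], base)); q[0]/q[1] raise IndexError
-- on short queries — excluded by Pre_, `.getD 0` is unreachable junk inside Pre_.
def solution (queries : List (List Int)) : List String :=
  let base := baseA
  queries.foldl
    (fun answer q =>
      let g := (PySem.List.pyGet? q 0).getD 0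
      let p := (PySem.List.pyGet? q 1).getD 0
      answer ++ [goA g p base]) []

-- ===== PORT B =====
-- B's while-loop for one query: walk upward from (g, p), overriding the running answer
-- whenever the current node is its parent's child 0 ("rr") or 1 ("RR") — ancestors
-- closer to the root override because "RR"/"rr" are absorbing. Tail-recursive as in Source B.
def climbB (g p : Int) (geno : String) : String :=
  if g > 1 then
    let ch := PySem.Int.band p 3
    let geno' := if ch = 0 then "rr" else if ch = 1 then "RR" else geno
    climbB (g - 1) (PySem.Int.floordiv p 4 + (if ch ≠ 0 then 1 else 0)) geno'
  else geno
termination_by g.toNat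
decreasing_by omega

-- B's outer loop appending one answer per query
def solution_alt (queries : List (List Int)) : List String :=
  queries.foldl
    (fun answer q =>
      answer ++ [climbB ((PySem.List.pyGet? q 0).getD 0) ((PySem.List.pyGet? q 1).getD 0) "Rr"])
    []

-- ===== PRECONDITION & SPEC =====
-- Pre_ excludes exactly the inputs where Python A raises: a query with fewer than two
-- entries (IndexError on q[0]/q[1]) or generation q[0] < 1 (unbounded recursion in go).
def Pre_solution (queries : List (List Int)) : Prop :=
  ∀ q ∈ queries, 2 ≤ q.length ∧ 1 ≤ q.headI
instance (queries : List (List Int)) : Decidable (Pre_solution queries) := by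
  unfold Pre_solution; infer_instance

def pvWitness_solution : List (List Int) := [[1, 0], [3, 5], [4, 2]]

def Spec_solution (queries : List (List Int)) (out : List String) : Prop := out = solution_alt queries
instance (queries : List (List Int)) (out : List String) : Decidable (Spec_solution queries out) := by unfold Spec_solution; infer_instance

-- ===== CLAIM (what is proved, stated in full; the proofs are below) =====
def Claim_equal_solution : Prop := ∀ (queries : List (List Int)), Dom_solution queries → Pre_solution queries → Spec_solution queries (solution queries)

-- ===== LEMMAS AND PROOFS =====

-- p & 3 is always one of 0, 1, 2, 3
theorem band3_range (p : Int) : 0 ≤ PySem.Int.band p 3 ∧ PySem.Int.band p 3 < 4 := by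
  unfold PySem.Int.band
  split_ifs with h1 h2
  · rw [show ((3:Int).toNat) = 3 from rfl, Nat.and_two_pow_sub_one_eq_mod p.toNat 2]
    have h4 : (2:Nat)^2 = 4 := rfl
    rw [h4]; omega
  · omega
  · rw [show ((3:Int).toNat) = 3 from rfl, Nat.land_comm,
        Nat.and_two_pow_sub_one_eq_mod (-p-1).toNat 2]
    have h4 : (2:Nat)^2 = 4 := rfl
    rw [h4]; omega
  · omega

-- A's result is always one of the three genotypes, and B's climb computes it with the
-- running answer `geno` substituted for "Rr": absorption of "RR"/"rr" in the base table.
theorem go_eq_climb (n : Nat) (g p : Int) (hg : g.toNat ≤ n) :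
    (goA g p baseA = "RR" ∨ goA g p baseA = "Rr" ∨ goA g p baseA = "rr") ∧
    ∀ geno, climbB g p geno = (if goA g p baseA = "Rr" then geno else goA g p baseA) := by
  induction n generalizing g p with
  | zero =>
    have hle : g ≤ 1 := by omega
    rw [goA]
    conv in climbB _ _ _ => rw [climbB]
    simp [hle, not_lt.mpr hle]
  | succ n ih =>
    by_cases hgt : g > 1
    · have h1 : ¬ g = 1 := by omega
      have h2 : ¬ g ≤ 1 := by omega
      rw [goA]
      simp only [if_neg h1, if_neg h2]
      obtain ⟨hr, hc⟩ := ih (g - 1) (PySem.Int.floordiv p 4 + (if PySem.Int.band p 3 ≠ 0 then 1 else 0)) (by omega)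
      obtain ⟨hl, hu⟩ := band3_range p
      set ch := PySem.Int.band p 3 with hch
      constructor
      · -- the table value is one of the three genotypes
        rcases hr with h | h | h <;> rw [h] <;>
          interval_cases ch <;>
          simp [baseA, PySem.Dict.empty, PySem.Dict.insert, PySem.Dict.get?,
            PySem.List.pyGet?, PySem.List.pyIdx?, List.find?]
      · intro geno
        conv_lhs => rw [climbB]
        simp only [if_pos hgt, ← hch]
        rw [hc]
        rcases hr with h | h | h <;> rw [h] <;>
          interval_cases ch <;>
          simp [baseA, PySem.Dict.empty, PySem.Dict.insert, PySem.Dict.get?,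
            PySem.List.pyGet?, PySem.List.pyIdx?, List.find?]
    · have h' : g ≤ 1 := by omega
      rw [goA]
      conv in climbB _ _ _ => rw [climbB]
      simp [h', not_lt.mpr h']

theorem solution_eq_alt (queries : List (List Int)) :
    solution queries = solution_alt queries := by
  unfold solution solution_alt
  simp only []
  induction queries using List.reverseRecOn with
  | nil => rfl
  | append_singleton qs q ih =>
    rw [List.foldl_append, List.foldl_append, ih]
    simp only [List.foldl_cons, List.foldl_nil]
    congr 1
    have h := (go_eq_climb ((PySem.List.pyGet? q 0).getD 0).toNat
      ((PySem.List.pyGet? q 0).getD 0) ((PySem.List.pyGet? q 1).getD 0) le_rfl).2 "Rr"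
    rw [h]
    split <;> simp_all

-- ===== VERDICT (by name: the statement is the Claim_ definition above) =====
theorem solution_spec : Claim_equal_solution := by
  intro queries _ _
  unfold Spec_solution
  exact solution_eq_alt queries
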